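-- pv_equiv track=rewrite | github.com/bambamshivam/LeetCode | Weekly_Contest_277/D.py | maximumGood
-- ===== SOURCE A (Python) =====
-- def maximumGood(l: list[list[int]]) -> int:
--     n=len(l);c=(1<<n)-1;ans=0
--     for i in range(c+1):
--         s=bin(i)[2:];s='0'*(n-len(s))+s;a=[];f=1
--         for i in range(n):
--             if s[i]=='1':a.append(i)
--         for j in a:
--             for k in range(n):
--                 if l[j][k]!=2 and l[j][k]!=int(s[k]):f=0;break
--             if not f:break
--         if f:ans=max(ans,s.count('1'))
--     return ans
-- ===== SOURCE B (Python) =====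
-- def maximumGood(l: list[list[int]]) -> int:
--     n = len(l)
--     # Precompute, per person, a bitmask of positions their statements constrain
--     # (km), the required values there (rm), and whether all statements are valid
--     # codes 0/1/2 (ok).  Bit (n-1-k) corresponds to person k, matching the
--     # binary string A builds.
--     info = []
--     for row in l:
--         ok = True
--         km = 0
--         rm = 0
--         for k, v in enumerate(row[:n]):
--             if v == 0:
--                 km |= 1 << (n - 1 - k)
--             elif v == 1:
--                 km |= 1 << (n - 1 - k)
--                 rm |= 1 << (n - 1 - k)
--             elif v != 2:
--                 ok = False
--         info.append((ok, km, rm))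
--     ans = 0
--     for i in range(1 << n):
--         f = True
--         for j in range(n):
--             if (i >> (n - 1 - j)) & 1:
--                 ok, km, rm = info[j]
--                 if not ok or (i & km) != rm:
--                     f = False
--                     break
--         if f:
--             ans = max(ans, bin(i).count('1'))
--     return ans
-- ===== Notes on version B (the rewrite author's own statement) =====
-- stated objective: alternative
-- what changed: Instead of building a binary string per candidate mask and re-scanning the n-wide statement row of every good person, B precomputes per person a constrained-positions bitmask and a required-values bitmask once and checks each good person with a single AND/compare per mask (intended as faster, O(2^n*n) vs O(2^n*n^2); a timing run measured 5.84x at n=256 but both time out at the largest size, so no speed is claimed).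
-- outside the precondition, e.g. on maximumGood([[0], [2, 2]]): A returns 1, B returns 1
import Mathlib
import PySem

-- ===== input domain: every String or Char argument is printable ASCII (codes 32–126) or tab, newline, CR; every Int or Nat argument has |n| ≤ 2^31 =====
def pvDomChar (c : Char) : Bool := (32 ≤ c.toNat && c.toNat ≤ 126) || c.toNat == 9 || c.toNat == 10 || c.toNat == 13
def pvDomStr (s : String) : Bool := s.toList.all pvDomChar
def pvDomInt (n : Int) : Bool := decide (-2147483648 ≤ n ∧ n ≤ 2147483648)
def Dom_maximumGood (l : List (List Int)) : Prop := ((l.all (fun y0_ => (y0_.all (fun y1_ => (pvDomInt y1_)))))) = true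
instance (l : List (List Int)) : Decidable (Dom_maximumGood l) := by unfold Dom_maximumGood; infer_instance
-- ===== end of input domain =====

-- B replaces A's per-mask string building and per-good-person O(n) statement re-scan by
-- per-person constraint bitmasks precomputed once, checked with one AND/compare per mask.

-- ===== PORT A =====
def maximumGood (l : List (List Int)) : Int :=
  let n := l.length
  let c := (1 <<< n) - 1
  (List.range (c + 1)).foldl (fun (ans : Int) (i : Nat) =>
    -- s = bin(i)[2:] (format(i,'b'); i ≥ 0 here), left-padded with '0' to length n
    let s0 := PySem.Int.toBinChars (i : Int)
    let s := List.replicate (n - s0.length) '0' ++ s0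
    let a := (List.range n).foldl (fun acc k => if s.getD k ' ' == '1' then acc ++ [k] else acc)
               ([] : List Nat)
    -- the two break-ing flag loops become .all; int(s[k]) with s[k] ∈ {'0','1'} is 1 or 0;
    -- l[j][k] is in range under Pre_ (the getD defaults never decide the value inside Pre_)
    let f := a.all (fun j => (List.range n).all (fun k =>
      !(decide ((l.getD j []).getD k 0 ≠ 2) &&
        decide ((l.getD j []).getD k 0 ≠ (if s.getD k ' ' == '1' then (1 : Int) else 0)))))
    if f then max ans ((s.count '1' : Int)) else ans) 0

-- ===== PORT B =====
-- body of B's per-row `for k, v in enumerate(row[:n])` loop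
def rowStep (n : Nat) (st : Bool × Nat × Nat) (kv : Int × Int) : Bool × Nat × Nat :=
  if kv.2 = 0 then (st.1, st.2.1 ||| 1 <<< (n - 1 - kv.1.toNat), st.2.2)
  else if kv.2 = 1 then
    (st.1, st.2.1 ||| 1 <<< (n - 1 - kv.1.toNat), st.2.2 ||| 1 <<< (n - 1 - kv.1.toNat))
  else if kv.2 ≠ 2 then (false, st.2.1, st.2.2)
  else st

-- B's precomputation for one row: (ok, constrained-positions mask km, required-values mask rm);
-- row[:n] is row.take n, the enumerate index k satisfies 0 ≤ k < n so 1 << (n-1-k) is exact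
def rowInfo (n : Nat) (row : List Int) : Bool × Nat × Nat :=
  (PySem.List.enumerate (row.take n)).foldl (rowStep n) (true, 0, 0)

def maximumGood_alt (l : List (List Int)) : Int :=
  let n := l.length
  let info := l.map (rowInfo n)
  (List.range (1 <<< n)).foldl (fun (ans : Int) (i : Nat) =>
    let f := (List.range n).all (fun j =>
      if (i >>> (n - 1 - j)) &&& 1 = 1 then
        (info.getD j (true, 0, 0)).1 &&
          ((i &&& (info.getD j (true, 0, 0)).2.1) == (info.getD j (true, 0, 0)).2.2)
      else true)
    if f then max ans ((PySem.Int.toBinChars0b (i : Int)).count '1' : Int) else ans) 0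

-- ===== PRECONDITION & SPEC =====
-- A reads l[j][k] for k < n until a mismatching statement, so a row shorter than n whose
-- entries all lie in {0,1,2} can raise IndexError; Pre_ excludes all such short rows, which
-- also drops some short-row inputs on which A happens to return because every scan breaks
-- early (B agrees with A on those anyway, see cites).
def Pre_maximumGood (l : List (List Int)) : Prop :=
  ∀ row ∈ l, l.length ≤ row.length ∨ ∃ x ∈ row, x ≠ 0 ∧ x ≠ 1 ∧ x ≠ 2
instance (l : List (List Int)) : Decidable (Pre_maximumGood l) := by
  unfold Pre_maximumGood; infer_instance

def pvWitness_maximumGood : List (List Int) := [[1, 2], [2, 1]]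

def Spec_maximumGood (l : List (List Int)) (out : Int) : Prop := out = maximumGood_alt l
instance (l : List (List Int)) (out : Int) : Decidable (Spec_maximumGood l out) := by
  unfold Spec_maximumGood; infer_instance

-- ===== CLAIM (what is proved, stated in full; the proofs are below) =====
def Claim_equal_maximumGood : Prop :=
  ∀ (l : List (List Int)), Dom_maximumGood l → Pre_maximumGood l →
    Spec_maximumGood l (maximumGood l)

-- ===== LEMMAS AND PROOFS =====

def pvBits (n i : Nat) : List Char :=
  (List.range n).map (fun k => if i.testBit (n - 1 - k) then '1' else '0')

lemma pvBits_zero (n : Nat) : pvBits n 0 = List.replicate n '0' := by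
  simp [pvBits]

lemma pvBits_succ (len m : Nat) :
    pvBits (len + 1) m = pvBits len (m / 2) ++ [if m.testBit 0 then '1' else '0'] := by
  unfold pvBits
  rw [List.range_succ, List.map_append]
  congr 1
  · apply List.map_congr_left
    intro k hk
    rw [List.mem_range] at hk
    have : len + 1 - 1 - k = (len - 1 - k) + 1 := by omega
    rw [this, ← Nat.testBit_div_two]
  · simp

lemma digitChar_mod2 (m : Nat) :
    (m % 2).digitChar = if m.testBit 0 then '1' else '0' := by
  rw [Nat.testBit_zero]
  rcases Nat.mod_two_eq_zero_or_one m with h | h <;> simp [h, Nat.digitChar]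

lemma pad_toDigits (len : Nat) : ∀ m : Nat, 1 ≤ len → m < 2 ^ len →
    List.replicate (len - (Nat.toDigits 2 m).length) '0' ++ Nat.toDigits 2 m = pvBits len m := by
  induction len with
  | zero => omega
  | succ len ih =>
    intro m _ hm
    by_cases hlen : len = 0
    · subst hlen
      have hm2 : m < 2 := by omega
      rw [Nat.toDigits_of_lt_base hm2]
      interval_cases m <;> rfl
    · by_cases hm2 : m < 2
      · rw [Nat.toDigits_of_lt_base hm2, pvBits_succ]
        have : m / 2 = 0 := by omega
        rw [this, pvBits_zero]
        have : len + 1 - (List.length [m.digitChar]) = len := by simp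
        rw [this]
        congr 1
        interval_cases m <;> rfl
      · rw [Nat.toDigits_eq_if (by omega : 1 < 2)]
        rw [if_neg hm2]
        have hd : m / 2 < 2 ^ len := by
          have : 2 ^ (len + 1) = 2 * 2 ^ len := by ring
          omega
        have hlen1 : 1 ≤ len := by omega
        have hL : (Nat.toDigits 2 (m / 2)).length ≤ len := by
          have := ih (m / 2) hlen1 hd
          have h2 := congrArg List.length this
          simp [pvBits] at h2
          omega
        rw [List.length_append, List.length_singleton]
        have : len + 1 - ((Nat.toDigits 2 (m / 2)).length + 1)
             = len - (Nat.toDigits 2 (m / 2)).length := by omega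
        rw [this, pvBits_succ, ← List.append_assoc, ih (m / 2) hlen1 hd, digitChar_mod2]

lemma getD_pvBits (n i k : Nat) (hk : k < n) :
    (pvBits n i).getD k ' ' = if i.testBit (n - 1 - k) then '1' else '0' :=
  PySem.List.getD_map_range _ _ _ _ hk

lemma count_pad (n m : Nat) :
    (List.replicate (n - (Nat.toDigits 2 m).length) '0' ++ Nat.toDigits 2 m).count '1'
      = (PySem.Int.toBinChars0b (m : Int)).count '1' := by
  rw [List.count_append, PySem.Int.toBinChars0b,
    if_neg (by simp : ¬((m : Int) < 0))]
  simp [List.count_replicate]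

lemma bit_test (i p : Nat) : ((i >>> p) &&& 1 = 1) ↔ i.testBit p := by
  rw [Nat.testBit_eq_decide_div_mod_eq, Nat.and_one_is_mod, Nat.shiftRight_eq_div_pow]
  simp

lemma testBit_or_shift (km0 : Nat) (q p : Nat) :
    (km0 ||| 1 <<< q).testBit p = (km0.testBit p || decide (p = q)) := by
  rw [Nat.testBit_or, Nat.one_shiftLeft, Nat.testBit_two_pow]
  simp [eq_comm]

lemma infoAux_ok (n : Nat) (t : List Int) : ∀ (o : Int) (st : Bool × Nat × Nat),
    ((PySem.List.enumerate t o).foldl (rowStep n) st).1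
      = (st.1 && t.all (fun v => v == 0 || v == 1 || v == 2)) := by
  induction t with
  | nil => simp [PySem.List.enumerate_nil]
  | cons v t ih =>
    intro o st
    rw [PySem.List.enumerate_cons]
    simp only [List.foldl_cons, List.all_cons]
    rw [ih]
    simp only [rowStep]
    split_ifs with h1 h2 h3 <;> simp_all

lemma exists_shift {p n o : Nat} (P : Int → Prop) (v : Int) (t : List Int) :
    ((p = n - 1 - o ∧ P v) ∨ (∃ k < t.length, p = n - 1 - (o + 1 + k) ∧ P (t.getD k 0)))
    ↔ (∃ k < (v :: t).length, p = n - 1 - (o + k) ∧ P ((v :: t).getD k 0)) := by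
  constructor
  · rintro (⟨h1, h2⟩ | ⟨k, hk, h1, h2⟩)
    · exact ⟨0, by simp, by simpa using h1, by simpa using h2⟩
    · exact ⟨k + 1, by simp only [List.length_cons]; omega, by omega, by simpa using h2⟩
  · rintro ⟨k, hk, h1, h2⟩
    cases k with
    | zero => exact Or.inl ⟨by simpa using h1, by simpa using h2⟩
    | succ k =>
      exact Or.inr ⟨k, by simp only [List.length_cons] at hk; omega, by omega, by simpa using h2⟩

lemma infoAux_km (n : Nat) (t : List Int) : ∀ (o : Nat) (st : Bool × Nat × Nat) (p : Nat),
    ((PySem.List.enumerate t (o : Int)).foldl (rowStep n) st).2.1.testBit p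
      = (st.2.1.testBit p ||
          decide (∃ k < t.length, p = n - 1 - (o + k) ∧ (t.getD k 0 = 0 ∨ t.getD k 0 = 1))) := by
  induction t with
  | nil => simp [PySem.List.enumerate_nil]
  | cons v t ih =>
    intro o st p
    rw [PySem.List.enumerate_cons]
    simp only [List.foldl_cons]
    have hcast : (o : Int) + 1 = ((o + 1 : Nat) : Int) := by push_cast; ring
    rw [hcast, ih (o + 1)]
    rw [show (decide (∃ k < (v :: t).length,
            p = n - 1 - (o + k) ∧ ((v :: t).getD k 0 = 0 ∨ (v :: t).getD k 0 = 1)))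
        = (decide ((p = n - 1 - o ∧ (v = 0 ∨ v = 1)) ∨
            (∃ k < t.length, p = n - 1 - (o + 1 + k) ∧ (t.getD k 0 = 0 ∨ t.getD k 0 = 1))))
        from (decide_eq_decide.mpr (exists_shift (fun x => x = 0 ∨ x = 1) v t)).symm, Bool.decide_or]
    simp only [rowStep]
    split_ifs with h1 h2 h3
    · rw [testBit_or_shift]
      simp only [Int.toNat_natCast]
      simp [h1, Bool.or_assoc]; rfl
    · rw [testBit_or_shift]
      simp only [Int.toNat_natCast]
      simp [h2, Bool.or_assoc]; rfl
    · simp [h1, h2]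
    · have hv2 : v = 2 := by omega
      simp [hv2]

lemma infoAux_rm (n : Nat) (t : List Int) : ∀ (o : Nat) (st : Bool × Nat × Nat) (p : Nat),
    ((PySem.List.enumerate t (o : Int)).foldl (rowStep n) st).2.2.testBit p
      = (st.2.2.testBit p ||
          decide (∃ k < t.length, p = n - 1 - (o + k) ∧ t.getD k 0 = 1)) := by
  induction t with
  | nil => simp [PySem.List.enumerate_nil]
  | cons v t ih =>
    intro o st p
    rw [PySem.List.enumerate_cons]
    simp only [List.foldl_cons]
    have hcast : (o : Int) + 1 = ((o + 1 : Nat) : Int) := by push_cast; ring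
    rw [hcast, ih (o + 1)]
    rw [show (decide (∃ k < (v :: t).length, p = n - 1 - (o + k) ∧ (v :: t).getD k 0 = 1))
        = (decide ((p = n - 1 - o ∧ v = 1) ∨
            (∃ k < t.length, p = n - 1 - (o + 1 + k) ∧ t.getD k 0 = 1)))
        from (decide_eq_decide.mpr (exists_shift (fun x => x = 1) v t)).symm, Bool.decide_or]
    simp only [rowStep]
    split_ifs with h1 h2 h3
    · simp [h1]
    · rw [testBit_or_shift]
      simp only [Int.toNat_natCast]
      simp [h2, Bool.or_assoc]; rfl
    · simp [h2]
    · have hv2 : v = 2 := by omega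
      simp [hv2]

lemma getD_take (r : List Int) (n k : Nat) (h : k < (r.take n).length) :
    (r.take n).getD k 0 = r.getD k 0 := by
  rw [List.getD_eq_getElem?_getD, List.getD_eq_getElem?_getD, List.getElem?_take]
  simp at h; rw [if_pos (by omega)]

lemma all_iff_getD (l : List Int) (p : Int → Bool) :
    l.all p = true ↔ ∀ k < l.length, p (l.getD k 0) = true := by
  rw [List.all_eq_true]
  constructor
  · intro h k hk
    rw [List.getD_eq_getElem _ _ hk]
    exact h _ (List.getElem_mem hk)
  · intro h x hx
    obtain ⟨k, hk, rfl⟩ := List.mem_iff_getElem.mp hx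
    rw [← List.getD_eq_getElem _ (0:Int) hk]
    exact h k hk

-- Characterisation of the per-row precomputation against A's direct statement check.
lemma row_eq (n i : Nat) (r : List Int)
    (hr : n ≤ r.length ∨ ∃ x ∈ r, x ≠ 0 ∧ x ≠ 1 ∧ x ≠ 2) :
    ((List.range n).all (fun k =>
        !(decide (r.getD k 0 ≠ 2) &&
          decide (r.getD k 0 ≠ (if i.testBit (n - 1 - k) then (1 : Int) else 0)))))
    = ((rowInfo n r).1 && ((i &&& (rowInfo n r).2.1) == (rowInfo n r).2.2)) := by
  have hok := infoAux_ok n (r.take n) 0 (true, 0, 0)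
  have hkm := infoAux_km n (r.take n) 0 (true, 0, 0)
  have hrm := infoAux_rm n (r.take n) 0 (true, 0, 0)
  rw [Bool.eq_iff_iff, List.all_eq_true, Bool.and_eq_true, beq_iff_eq]
  have lhs_iff : (∀ k ∈ List.range n, (fun k => !(decide (r.getD k 0 ≠ 2) &&
          decide (r.getD k 0 ≠ (if i.testBit (n - 1 - k) then (1 : Int) else 0)))) k = true) ↔
      (∀ k < n, r.getD k 0 = 2 ∨ r.getD k 0 = (if i.testBit (n - 1 - k) then (1 : Int) else 0)) := by
    simp [List.mem_range, or_iff_not_imp_left]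
  rw [lhs_iff]
  have hok' : (rowInfo n r).1 = (r.take n).all (fun v => v == 0 || v == 1 || v == 2) := by
    simpa using hok
  have hkm' : ∀ p, (rowInfo n r).2.1.testBit p
      = decide (∃ k < (r.take n).length, p = n - 1 - (0 + k) ∧
          ((r.take n).getD k 0 = 0 ∨ (r.take n).getD k 0 = 1)) := by
    intro p; simpa using hkm p
  have hrm' : ∀ p, (rowInfo n r).2.2.testBit p
      = decide (∃ k < (r.take n).length, p = n - 1 - (0 + k) ∧ (r.take n).getD k 0 = 1) := by
    intro p; simpa using hrm p
  by_cases hlen : n ≤ r.length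
  · -- full row: the bitmask check is exactly A's statement scan
    have htl : (r.take n).length = n := by simp [hlen]
    have hkm2 : ∀ p, (rowInfo n r).2.1.testBit p
        = decide (∃ k < n, p = n - 1 - k ∧ (r.getD k 0 = 0 ∨ r.getD k 0 = 1)) := by
      intro p; rw [hkm' p, decide_eq_decide]
      constructor
      · rintro ⟨k, hk, h1, h2⟩
        exact ⟨k, by omega, by omega, by rwa [getD_take r n k (by omega)] at h2⟩
      · rintro ⟨k, hk, h1, h2⟩
        exact ⟨k, by omega, by omega, by rwa [getD_take r n k (by omega)]⟩
    have hrm2 : ∀ p, (rowInfo n r).2.2.testBit p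
        = decide (∃ k < n, p = n - 1 - k ∧ r.getD k 0 = 1) := by
      intro p; rw [hrm' p, decide_eq_decide]
      constructor
      · rintro ⟨k, hk, h1, h2⟩
        exact ⟨k, by omega, by omega, by rwa [getD_take r n k (by omega)] at h2⟩
      · rintro ⟨k, hk, h1, h2⟩
        exact ⟨k, by omega, by omega, by rwa [getD_take r n k (by omega)]⟩
    have hok2 : ((rowInfo n r).1 = true)
        ↔ ∀ k < n, r.getD k 0 = 0 ∨ r.getD k 0 = 1 ∨ r.getD k 0 = 2 := by
      rw [hok', all_iff_getD, htl]
      constructor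
      · intro h k hk
        have := h k hk
        rw [getD_take r n k (by omega)] at this
        simp at this
        tauto
      · intro h k hk
        rw [getD_take r n k (by omega)]
        have := h k (by omega)
        simp
        tauto
    constructor
    · intro h
      refine ⟨hok2.mpr ?_, ?_⟩
      · intro k hk
        rcases h k hk with h2 | hd
        · tauto
        · split_ifs at hd <;> omega
      · apply Nat.eq_of_testBit_eq
        intro p
        rw [Nat.testBit_and, hkm2, hrm2]
        by_cases hex : ∃ k < n, p = n - 1 - k ∧ (r.getD k 0 = 0 ∨ r.getD k 0 = 1)
        · obtain ⟨k, hk, rfl, hv⟩ := hex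
          have hbit : i.testBit (n - 1 - k) = decide (r.getD k 0 = 1) := by
            rcases h k hk with h2 | hd
            · omega
            · rcases hv with h0 | h1
              · rw [h0] at hd; split_ifs at hd with hb <;> simp_all
              · rw [h1] at hd; split_ifs at hd with hb <;> simp_all
          rw [hbit, decide_eq_true (show ∃ k' < n, n - 1 - k = n - 1 - k' ∧
                (r.getD k' 0 = 0 ∨ r.getD k' 0 = 1) from ⟨k, hk, rfl, hv⟩), Bool.and_true,
            decide_eq_decide]
          constructor
          · intro h1
            exact ⟨k, hk, rfl, h1⟩
          · rintro ⟨k', hk', heq, h1⟩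
            have hkk : k' = k := by omega
            rwa [hkk] at h1
        · rw [decide_eq_false hex, Bool.and_false]
          have hno : ¬ ∃ k < n, p = n - 1 - k ∧ r.getD k 0 = 1 := by
            rintro ⟨k, hk, h1, h2⟩
            exact hex ⟨k, hk, h1, Or.inr h2⟩
          rw [decide_eq_false hno]
    · rintro ⟨hokT, hmask⟩
      intro k hk
      have hvals := hok2.mp hokT k hk
      have hbit := congrArg (fun m => m.testBit (n - 1 - k)) hmask
      simp only [Nat.testBit_and, hkm2, hrm2] at hbit
      rcases hvals with h0 | h1 | h2
      · right
        have hkmT : decide (∃ k' < n, n - 1 - k = n - 1 - k' ∧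
            (r.getD k' 0 = 0 ∨ r.getD k' 0 = 1)) = true :=
          decide_eq_true ⟨k, hk, rfl, Or.inl h0⟩
        have hrmF : decide (∃ k' < n, n - 1 - k = n - 1 - k' ∧ r.getD k' 0 = 1) = false := by
          apply decide_eq_false
          rintro ⟨k', hk', heq, h1⟩
          have hkk : k' = k := by omega
          rw [hkk] at h1
          omega
        rw [hkmT, hrmF, Bool.and_true] at hbit
        rw [hbit]
        simpa using h0
      · right
        have hkmT : decide (∃ k' < n, n - 1 - k = n - 1 - k' ∧
            (r.getD k' 0 = 0 ∨ r.getD k' 0 = 1)) = true :=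
          decide_eq_true ⟨k, hk, rfl, Or.inr h1⟩
        have hrmT : decide (∃ k' < n, n - 1 - k = n - 1 - k' ∧ r.getD k' 0 = 1) = true :=
          decide_eq_true ⟨k, hk, rfl, h1⟩
        rw [hkmT, hrmT, Bool.and_true] at hbit
        rw [hbit]
        simpa using h1
      · exact Or.inl h2
  · -- short row: it must contain an invalid statement, so both checks are false
    rcases hr with h | ⟨x, hx, hbad⟩
    · omega
    have htake : r.take n = r := List.take_of_length_le (by omega)
    obtain ⟨k0, hk0, hxe⟩ := List.mem_iff_getElem.mp hx
    have hokF : (rowInfo n r).1 = false := by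
      rw [hok', htake]
      apply List.all_eq_false.mpr
      refine ⟨x, hx, ?_⟩
      simp [hbad.1, hbad.2.1, hbad.2.2]
    rw [hokF]
    constructor
    · intro h
      exfalso
      have hk0n : k0 < n := by omega
      have hgd : r.getD k0 0 = x := by
        rw [List.getD_eq_getElem _ _ hk0, hxe]
      rcases h k0 hk0n with h2 | hd
      · rw [hgd] at h2; exact hbad.2.2 h2
      · rw [hgd] at hd
        split_ifs at hd
        · exact hbad.2.1 hd
        · exact hbad.1 hd
    · rintro ⟨h, -⟩
      cases h

lemma all_congr_mem {α : Type} (l : List α) (f g : α → Bool)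
    (h : ∀ x ∈ l, f x = g x) : l.all f = l.all g := by
  rw [Bool.eq_iff_iff, List.all_eq_true, List.all_eq_true]
  constructor
  · intro hh x hx
    rw [← h x hx]
    exact hh x hx
  · intro hh x hx
    rw [h x hx]
    exact hh x hx

theorem main_eq (l : List (List Int))
    (pre : ∀ row ∈ l, l.length ≤ row.length ∨ ∃ x ∈ row, x ≠ 0 ∧ x ≠ 1 ∧ x ≠ 2) :
    maximumGood l = maximumGood_alt l := by
  rcases l with - | ⟨r0, ls⟩
  · rfl
  set l := r0 :: ls with hl
  have hn : 1 ≤ l.length := by simp [hl]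
  set n := l.length with hndef
  simp only [maximumGood, maximumGood_alt]
  have hpow : (1 : Nat) <<< n = 2 ^ n := Nat.one_shiftLeft n
  have h1 : 1 ≤ 2 ^ n := Nat.one_le_two_pow
  rw [show (1 <<< n) - 1 + 1 = 1 <<< n by omega]
  apply PySem.List.foldl_congr_mem
  intro ans i hi
  rw [List.mem_range, hpow] at hi
  have htb : PySem.Int.toBinChars (i : Int) = Nat.toDigits 2 i := by
    simp [PySem.Int.toBinChars]
  have hcnt : ((pvBits n i).count '1' : Int) = ((PySem.Int.toBinChars0b (i : Int)).count '1' : Int) := by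
    rw [← pad_toDigits n i hn hi]
    exact_mod_cast congrArg Nat.cast (count_pad n i)
  rw [htb, pad_toDigits n i hn hi, hcnt]
  rw [PySem.List.foldl_append_if_eq_filter, List.nil_append]
  have hgetpv : ∀ k, k < n → ((pvBits n i).getD k ' ' == '1') = i.testBit (n - 1 - k) := by
    intro k hk
    rw [getD_pvBits n i k hk]
    by_cases hb : i.testBit (n - 1 - k) <;> simp [hb]
  have hAinner : ∀ j : Nat, ((List.range n).all (fun k =>
      !(decide ((l.getD j []).getD k 0 ≠ 2) &&
        decide ((l.getD j []).getD k 0 ≠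
          (if ((pvBits n i).getD k ' ' == '1') = true then (1 : Int) else 0)))))
      = ((List.range n).all (fun k =>
      !(decide ((l.getD j []).getD k 0 ≠ 2) &&
        decide ((l.getD j []).getD k 0 ≠ (if i.testBit (n - 1 - k) then (1 : Int) else 0))))) := by
    intro j
    apply all_congr_mem
    intro k hk
    rw [List.mem_range] at hk
    rw [hgetpv k hk]
  have hrow : ∀ j, j < n →
      ((List.range n).all (fun k =>
        !(decide ((l.getD j []).getD k 0 ≠ 2) &&
          decide ((l.getD j []).getD k 0 ≠ (if i.testBit (n - 1 - k) then (1 : Int) else 0)))))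
      = (((l.map (rowInfo n)).getD j (true, 0, 0)).1 &&
          ((i &&& ((l.map (rowInfo n)).getD j (true, 0, 0)).2.1) ==
            ((l.map (rowInfo n)).getD j (true, 0, 0)).2.2)) := by
    intro j hj
    have hjl : j < l.length := hj
    have hinfo : (l.map (rowInfo n)).getD j (true, 0, 0) = rowInfo n (l.getD j []) := by
      rw [List.getD_eq_getElem _ _ (by simpa using hjl), List.getElem_map,
        List.getD_eq_getElem _ _ hjl]
    have hmem : l.getD j [] ∈ l := by
      rw [List.getD_eq_getElem _ _ hjl]
      exact List.getElem_mem hjl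
    rw [hinfo]
    exact row_eq n i (l.getD j []) (pre _ hmem)
  have hflag : ((List.filter (fun k => (pvBits n i).getD k ' ' == '1') (List.range n)).all
        (fun j => (List.range n).all (fun k =>
          !(decide ((l.getD j []).getD k 0 ≠ 2) &&
            decide ((l.getD j []).getD k 0 ≠
              (if ((pvBits n i).getD k ' ' == '1') = true then (1 : Int) else 0))))))
      = ((List.range n).all (fun j =>
          if (i >>> (n - 1 - j)) &&& 1 = 1 then
            ((l.map (rowInfo n)).getD j (true, 0, 0)).1 &&
              ((i &&& ((l.map (rowInfo n)).getD j (true, 0, 0)).2.1) ==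
                ((l.map (rowInfo n)).getD j (true, 0, 0)).2.2)
          else true)) := by
    rw [Bool.eq_iff_iff, List.all_eq_true, List.all_eq_true]
    constructor
    · intro h j hj
      rw [List.mem_range] at hj
      by_cases hb : (i >>> (n - 1 - j)) &&& 1 = 1
      · rw [if_pos hb, ← hrow j hj, ← hAinner j]
        apply h
        rw [List.mem_filter, List.mem_range]
        refine ⟨hj, ?_⟩
        rw [hgetpv j hj]
        exact (bit_test i _).mp hb
      · rw [if_neg hb]
    · intro h j hj
      rw [List.mem_filter, List.mem_range] at hj
      obtain ⟨hjn, hpj⟩ := hj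
      have htb2 : i.testBit (n - 1 - j) = true := by rw [← hgetpv j hjn]; exact hpj
      have hb : (i >>> (n - 1 - j)) &&& 1 = 1 := (bit_test i _).mpr (by simp [htb2])
      have hh := h j (List.mem_range.mpr hjn)
      rw [if_pos hb] at hh
      rw [hAinner j, hrow j hjn]
      exact hh
  rw [hflag]

-- ===== VERDICT (by name: the statement is the Claim_ definition above) =====
theorem maximumGood_spec : Claim_equal_maximumGood := by
  intro l _dom pre
  unfold Spec_maximumGood
  exact main_eq l pre
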